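-- pv_equiv track=rewrite | github.com/DamonHolland/RubiksRobot | MotorControler/RubiksSerialTools.py | parse_moves_strict
-- ===== SOURCE A (Python) =====
-- def parse_moves_strict(move_array, motor_speed):
--     # Convert to degrees
--     for i in range(len(move_array)):
--         if len(move_array[i]) > 1:
--             move_array[i] = move_array[i][0] + "-90"
--         else:
--             move_array[i] = move_array[i] + "90"
--     # Combine Consecutive Moves
--     i = 1
--     while i < len(move_array):
--         if move_array[i][0] == move_array[i - 1][0]:
--             degree1 = int(move_array[i][1:])
--             degree2 = int(move_array[i - 1][1:])
--             move_array[i - 1] = move_array[i - 1][0] + str(degree1 + degree2)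
--             move_array.pop(i)
--         i += 1
--     return motor_speed + ' ' + ' '.join(move_array)
-- ===== SOURCE B (Python) =====
-- def parse_moves_strict(move_array, motor_speed):
--     # Single pass: each move becomes a (face, degrees) pair; consecutive moves on
--     # the same face are merged pairwise left-to-right (a merged move is not merged
--     # again), appending to an output list instead of popping from the input.
--     conv = [(m[0], -90 if len(m) > 1 else 90) for m in move_array]
--     out = []
--     j = 0
--     n = len(conv)
--     while j < n:
--         c, d = conv[j]
--         if j + 1 < n and conv[j + 1][0] == c:
--             out.append(c + str(conv[j + 1][1] + d))
--             j += 2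
--         else:
--             out.append(c + str(d))
--             j += 1
--     return motor_speed + ' ' + ' '.join(out)
-- ===== Notes on version B (the rewrite author's own statement) =====
-- stated objective: faster
-- what changed: B converts each move once to a (face, degrees) pair and emits the merged result in a single pairwise left-to-right pass over an output list, instead of A's in-place rewrite followed by a while loop that list.pop's merged elements (each pop shifts the tail); Pre_ excludes move lists containing an empty move string, on which A's result (face '9', degree 0, from ""+"90") is an accident of string concatenation and B's natural m[0] indexing raises.
-- outside the precondition, e.g. on parse_moves_strict(['', 'F'], '40'): A returns '40 90 F90', B raises IndexError
import Mathlib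
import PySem

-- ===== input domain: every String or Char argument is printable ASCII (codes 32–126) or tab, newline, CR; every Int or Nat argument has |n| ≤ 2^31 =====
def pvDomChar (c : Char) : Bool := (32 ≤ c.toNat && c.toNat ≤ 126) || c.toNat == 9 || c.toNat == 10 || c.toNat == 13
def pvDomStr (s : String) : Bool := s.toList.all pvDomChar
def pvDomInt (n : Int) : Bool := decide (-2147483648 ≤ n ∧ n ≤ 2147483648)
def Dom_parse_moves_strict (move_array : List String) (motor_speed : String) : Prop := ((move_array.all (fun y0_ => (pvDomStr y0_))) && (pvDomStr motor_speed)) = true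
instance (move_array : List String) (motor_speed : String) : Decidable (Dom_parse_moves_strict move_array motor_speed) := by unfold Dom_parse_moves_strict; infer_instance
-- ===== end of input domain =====

-- B replaces A's quadratic merge loop (list.pop shifts the tail on every merge) by a
-- single pairwise pass over (face, degrees) pairs; equivalence is about the RETURN
-- value only (A rewrites `move_array` in place, B leaves it untouched).

-- ===== PORT A =====
-- move_array[i] = move_array[i][0] + "-90"  /  move_array[i] + "90"
def pvDegA (m : String) : String :=
  if 1 < PySem.Str.len m then
    match PySem.Str.pyGet? m 0 with     -- m[0]; `none` unreachable since len m > 1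
    | some c => String.ofList (c :: "-90".toList)
    | none => ""
  else String.ofList (m.toList ++ "90".toList)

-- the `while i < len(move_array)` loop; `i` starts at 1 and only grows
def pvLoopA (arr : List String) (i : Nat) : List String :=
  if h : i < arr.length then
    let cur := arr[i]
    let prev := arr.getD (i - 1) ""     -- i ≥ 1 on every call, so move_array[i-1]
    if PySem.Str.pyGet? cur 0 == PySem.Str.pyGet? prev 0 then
      let degree1 := (PySem.Int.ofStr? (PySem.Str.slice cur (some 1) none)).getD 0   -- int(move_array[i][1:]); never ValueError here
      let degree2 := (PySem.Int.ofStr? (PySem.Str.slice prev (some 1) none)).getD 0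
      let merged := match PySem.Str.pyGet? prev 0 with     -- move_array[i-1][0] + str(d1+d2)
        | some c => String.ofList (c :: PySem.Int.toChars (degree1 + degree2))
        | none => ""
      pvLoopA ((arr.set (i - 1) merged).eraseIdx i) (i + 1)    -- move_array.pop(i), i += 1
    else pvLoopA arr (i + 1)
  else arr
termination_by arr.length - i
decreasing_by
  · have hh : ∀ (v : String), ((arr.set (i - 1) v).eraseIdx i).length = arr.length - 1 := by
      intro v; simp [List.length_eraseIdx, h]
    rw [hh]; omega
  · omega

def parse_moves_strict (move_array : List String) (motor_speed : String) : String :=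
  -- the `for i in range(len(move_array))` rewrite, then the while loop from i = 1
  String.ofList (motor_speed.toList ++ ' ' :: (PySem.Str.join " " (pvLoopA (move_array.map pvDegA) 1)).toList)

-- ===== PORT B =====
-- (m[0], -90 if len(m) > 1 else 90); m[0] raises on "" (excluded by Pre_), placeholder there
def pvPair (m : String) : Char × Int :=
  match m.toList with
  | [] => (' ', 0)
  | [c] => (c, 90)
  | c :: _ :: _ => (c, -90)

def pvRender (p : Char × Int) : String := String.ofList (p.1 :: PySem.Int.toChars p.2)   -- c + str(d)

-- the `while j < n` pairwise pass of Source B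
def pvMergeB : List (Char × Int) → List String
  | [] => []
  | [p] => [pvRender p]
  | p :: q :: rest =>
    if q.1 == p.1 then pvRender (p.1, q.2 + p.2) :: pvMergeB rest
    else pvRender p :: pvMergeB (q :: rest)

def parse_moves_strict_alt (move_array : List String) (motor_speed : String) : String :=
  String.ofList (motor_speed.toList ++ ' ' :: (PySem.Str.join " " (pvMergeB (move_array.map pvPair))).toList)

-- ===== PRECONDITION & SPEC =====
-- Pre_ excludes move lists containing an empty move string: A there returns a value
-- ("" + "90" makes '9' the face and 0 the degrees, an accident of concatenation),
-- while B's natural m[0] indexing raises IndexError.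
def Pre_parse_moves_strict (move_array : List String) (motor_speed : String) : Prop :=
  ∀ m ∈ move_array, m ≠ ""
instance (move_array : List String) (motor_speed : String) : Decidable (Pre_parse_moves_strict move_array motor_speed) := by unfold Pre_parse_moves_strict; infer_instance

def pvWitness_parse_moves_strict : List String × String := (["F", "F'", "U"], "40")

def Spec_parse_moves_strict (move_array : List String) (motor_speed : String) (out : String) : Prop := out = parse_moves_strict_alt move_array motor_speed
instance (move_array : List String) (motor_speed : String) (out : String) : Decidable (Spec_parse_moves_strict move_array motor_speed out) := by unfold Spec_parse_moves_strict; infer_instance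

-- ===== CLAIM (what is proved, stated in full; the proofs are below) =====
def Claim_equal_parse_moves_strict : Prop := ∀ (move_array : List String) (motor_speed : String), Dom_parse_moves_strict move_array motor_speed → Pre_parse_moves_strict move_array motor_speed → Spec_parse_moves_strict move_array motor_speed (parse_moves_strict move_array motor_speed)

-- ===== LEMMAS AND PROOFS =====

-- "the degree suffix of pvRender p parses back to p.2"
def pvOK (p : Char × Int) : Prop :=
  (PySem.Int.ofStr? (PySem.Str.slice (pvRender p) (some 1) none)).getD 0 = p.2

set_option maxHeartbeats 1000000 in
theorem pv_deg_eq_render (m : String) (hm : m ≠ "") : pvDegA m = pvRender (pvPair m) := by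
  have hne : m.toList ≠ [] := by
    intro h
    apply hm
    rw [show m = String.ofList m.toList from (String.ofList_toList).symm, h]
  rw [show m = String.ofList m.toList from (String.ofList_toList).symm]
  generalize m.toList = l at hne ⊢
  rcases l with _ | ⟨c, _ | ⟨d, tl⟩⟩
  · exact absurd rfl hne
  all_goals clear hne hm
  · simp [pvDegA, pvPair, pvRender, pysem,
      (by decide : PySem.Int.toChars 90 = ['9', '0'])]
  · simp [pvDegA, pvPair, pvRender, pysem,
      (by decide : PySem.Int.toChars (-90) = ['-', '9', '0'])]

theorem pv_get0_render (p : Char × Int) : PySem.Str.pyGet? (pvRender p) 0 = some p.1 := by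
  simp [pvRender, pysem]

theorem pvOK_render_of (p : Char × Int)
    (h : PySem.Int.ofChars? (PySem.Int.toChars p.2) = some p.2) : pvOK p := by
  unfold pvOK
  rw [PySem.Int.ofStr?.eq_1]
  have hsl : (PySem.Str.slice (pvRender p) (some 1) none).toList = PySem.Int.toChars p.2 := by
    simp [pvRender, pysem, PySem.List.slice_from_one]
  rw [hsl, h, Option.getD_some]

theorem pvOK_pair (m : String) : pvOK (pvPair m) := by
  rcases hm : m.toList with _ | ⟨c, _ | ⟨d, tl⟩⟩ <;> simp only [pvPair, hm]
  · exact pvOK_render_of _ (by show PySem.Int.ofChars? (PySem.Int.toChars (0:Int)) = some 0; decide)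
  · exact pvOK_render_of _ (by show PySem.Int.ofChars? (PySem.Int.toChars (90:Int)) = some 90; decide)
  · exact pvOK_render_of _ (by show PySem.Int.ofChars? (PySem.Int.toChars (-90:Int)) = some (-90); decide)

theorem pv_loop_stop (arr : List String) (i : Nat) (h : ¬ i < arr.length) :
    pvLoopA arr i = arr := by
  rw [pvLoopA]; simp [h]

theorem pv_loop_single (pre : List String) (x : Char × Int) :
    pvLoopA (pre ++ [pvRender x]) (pre.length + 1) = pre ++ [pvRender x] := by
  apply pv_loop_stop; simp

theorem pv_loop_merge (n : Nat) : ∀ (ps : List (Char × Int)), ps.length ≤ n →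
    (∀ p ∈ ps, pvOK p) → ∀ (pre : List String) (x : Char × Int), pvOK x →
    pvLoopA (pre ++ (x :: ps).map pvRender) (pre.length + 1) = pre ++ pvMergeB (x :: ps) := by
  induction n with
  | zero =>
    intro ps hlen _ pre x _
    have : ps = [] := List.eq_nil_of_length_eq_zero (Nat.le_zero.mp hlen)
    subst this
    simpa [pvMergeB] using pv_loop_single pre x
  | succ n ih =>
    intro ps hlen hOK pre x hx
    cases ps with
    | nil => simpa [pvMergeB] using pv_loop_single pre x
    | cons y rest =>
      have hy : pvOK y := hOK y (by simp)
      have hi : pre.length + 1 < (pre ++ (x :: y :: rest).map pvRender).length := by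
        simp
      rw [pvLoopA, dif_pos hi]
      have hcur : (pre ++ (x :: y :: rest).map pvRender)[pre.length + 1]'hi = pvRender y := by
        rw [List.getElem_append_right (by omega)]
        simp
      have hprev : (pre ++ (x :: y :: rest).map pvRender).getD (pre.length + 1 - 1) "" = pvRender x := by
        simp [List.getD]
      simp only [hcur, hprev, pv_get0_render, beq_iff_eq, Option.some.injEq]
      by_cases hc : y.1 = x.1
      · rw [if_pos hc]
        have hd1 : (PySem.Int.ofStr? (PySem.Str.slice (pvRender y) (some 1) none)).getD 0 = y.2 := hy
        have hd2 : (PySem.Int.ofStr? (PySem.Str.slice (pvRender x) (some 1) none)).getD 0 = x.2 := hx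
        rw [hd1, hd2]
        have hset : ((pre ++ (x :: y :: rest).map pvRender).set (pre.length + 1 - 1)
            (String.ofList (x.1 :: PySem.Int.toChars (y.2 + x.2)))).eraseIdx (pre.length + 1)
            = pre ++ pvRender (x.1, y.2 + x.2) :: rest.map pvRender := by
          simp only [Nat.add_sub_cancel, List.map_cons]
          rw [List.set_append_right _ _ (by omega), Nat.sub_self]
          rw [List.eraseIdx_append_of_length_le (by simp)]
          simp [pvRender]
        rw [hset]
        cases rest with
        | nil =>
          rw [pv_loop_stop _ _ (by simp)]
          simp [pvMergeB, pvRender, hc]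
        | cons z rest' =>
          have hre : pre ++ pvRender (x.1, y.2 + x.2) :: (z :: rest').map pvRender
              = (pre ++ [pvRender (x.1, y.2 + x.2)]) ++ (z :: rest').map pvRender := by simp
          have hidx : pre.length + 1 + 1 = (pre ++ [pvRender (x.1, y.2 + x.2)]).length + 1 := by simp
          rw [hre, hidx, ih rest' (by have := hlen; simp at this; omega)
            (fun p hp => hOK p (by simp [hp])) _ z (hOK z (by simp))]
          simp [pvMergeB, hc]
      · rw [if_neg hc]
        have hre : pre ++ (x :: y :: rest).map pvRender
            = (pre ++ [pvRender x]) ++ (y :: rest).map pvRender := by simp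
        have hidx : pre.length + 1 + 1 = (pre ++ [pvRender x]).length + 1 := by simp
        rw [hre, hidx, ih rest (by have := hlen; simp at this; omega)
          (fun p hp => hOK p (by simp [hp])) _ y hy]
        simp [pvMergeB, hc]

-- ===== VERDICT (by name: the statement is the Claim_ definition above) =====
theorem parse_moves_strict_spec : Claim_equal_parse_moves_strict := by
  intro move_array motor_speed _ hpre
  unfold Spec_parse_moves_strict parse_moves_strict parse_moves_strict_alt
  have harr : move_array.map pvDegA = (move_array.map pvPair).map pvRender := by
    rw [List.map_map]
    exact List.map_congr_left (fun m hm => pv_deg_eq_render m (hpre m hm))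
  have hmerge : pvLoopA (move_array.map pvDegA) 1 = pvMergeB (move_array.map pvPair) := by
    cases hm : move_array with
    | nil => simp [pvLoopA, pvMergeB]
    | cons m ms =>
      subst hm
      rw [harr]
      have := pv_loop_merge (ms.map pvPair).length (ms.map pvPair) le_rfl
        (by intro p hp; obtain ⟨q, _, rfl⟩ := List.mem_map.mp hp; exact pvOK_pair q)
        [] (pvPair m) (pvOK_pair m)
      simpa using this
  rw [hmerge]
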